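-- pv_equiv track=rewrite | github.com/somabencsik/AoC2024 | Day3/task2.py | find_instructions
-- ===== SOURCE A (Python) =====
-- def next_instruction(string: str, sub_string: str, start_idx: int) -> int | None:
--     try:
--         return string.index(sub_string, start_idx)
--     except ValueError:
--         return None
--
-- def find_instructions(memory: str) -> list[tuple[True, int]]:
--     instructions = []
--
--     start_idx = 0
--     while next_instruction(memory, "do()", start_idx) is not None:
--         instructions.append((True, memory.index("do()", start_idx)))
--         start_idx = memory.index("do()", start_idx) + 3
--
--     start_idx = 0
--     while next_instruction(memory, "don't()", start_idx) is not None: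
--         instructions.append((False, memory.index("don't()", start_idx)))
--         start_idx = memory.index("don't()", start_idx) + 3
--
--     instructions = sorted(instructions, key=lambda l: l[1])
--
--     return instructions
-- ===== SOURCE B (Python) =====
-- def find_instructions(memory: str) -> list:
--     instructions = []
--     for i in range(len(memory)):
--         if memory[i:i+4] == "do()":
--             instructions.append((True, i))
--         elif memory[i:i+7] == "don't()":
--             instructions.append((False, i))
--     return instructions
-- ===== Notes on version B (the rewrite author's own statement) =====
-- stated objective: simpler
-- what changed: Replaces the two while-loops over str.index (one per marker) plus a final sort by a single left-to-right scan that tests both markers at each position and emits the pairs already in position order, with no helper and no sort.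
import Mathlib
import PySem

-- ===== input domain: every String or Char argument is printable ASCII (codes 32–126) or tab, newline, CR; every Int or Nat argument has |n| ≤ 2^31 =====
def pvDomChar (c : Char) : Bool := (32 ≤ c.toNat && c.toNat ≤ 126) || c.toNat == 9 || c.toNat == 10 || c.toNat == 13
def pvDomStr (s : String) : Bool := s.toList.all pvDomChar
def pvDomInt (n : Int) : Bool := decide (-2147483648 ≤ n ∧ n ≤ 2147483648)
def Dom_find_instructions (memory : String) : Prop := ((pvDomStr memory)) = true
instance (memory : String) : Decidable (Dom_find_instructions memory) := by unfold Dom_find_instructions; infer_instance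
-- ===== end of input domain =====

-- B replaces A's two str.index while-loops plus a final sort by one left-to-right scan
-- emitting the (flag, position) pairs already in order (objective: simpler).

-- ===== PORT A =====
-- helper next_instruction: string.index(sub, start) with ValueError caught as None
def next_instruction (string : String) (sub_string : String) (start_idx : Int) : Option Int :=
  let r := PySem.Str.findFrom string sub_string start_idx
  if r = -1 then none else some r

-- one of A's two identical while-loops (fuel bounds the iteration count; each
-- iteration advances start_idx by at least 3, so length+1 fuel never runs out)
def findLoopA (memory sub : String) (flag : Bool) (instructions : List (Bool × Int))
    (start_idx : Int) (fuel : Nat) : List (Bool × Int) :=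
  match fuel with
  | 0 => instructions
  | fuel + 1 =>
    match next_instruction memory sub start_idx with
    | none => instructions
    | some i => findLoopA memory sub flag (instructions ++ [(flag, i)]) (i + 3) fuel

def find_instructions (memory : String) : List (Bool × Int) :=
  let ins1 := findLoopA memory "do()" true [] 0 (memory.toList.length + 1)
  let ins2 := findLoopA memory "don't()" false ins1 0 (memory.toList.length + 1)
  PySem.List.sorted ins2 (fun l => l.2)

-- ===== PORT B =====
def find_instructions_alt (memory : String) : List (Bool × Int) :=
  (PySem.List.pyRange 0 (PySem.Str.len memory) 1).foldl
    (fun acc i =>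
      if PySem.List.slice memory.toList (some i) (some (i + 4)) = "do()".toList then
        acc ++ [(true, i)]
      else if PySem.List.slice memory.toList (some i) (some (i + 7)) = "don't()".toList then
        acc ++ [(false, i)]
      else acc) []

-- ===== PRECONDITION & SPEC =====
def Spec_find_instructions (memory : String) (out : List (Bool × Int)) : Prop := out = find_instructions_alt memory
instance (memory : String) (out : List (Bool × Int)) : Decidable (Spec_find_instructions memory out) := by unfold Spec_find_instructions; infer_instance

-- ===== CLAIM (what is proved, stated in full; the proofs are below) =====
def Claim_equal_find_instructions : Prop := ∀ (memory : String), Dom_find_instructions memory → Spec_find_instructions memory (find_instructions memory)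

-- ===== LEMMAS AND PROOFS =====

-- the two marker patterns
def patD : List Char := ['d', 'o', '(', ')']
def patN : List Char := ['d', 'o', 'n', '\'', 't', '(', ')']

-- all positions ≥ s at which pattern p occurs in l, in increasing order
def occsFrom (p l : List Char) (s : Nat) : List Nat :=
  if _h : s < l.length then
    (if p <+: l.drop s then [s] else []) ++ occsFrom p l (s + 1)
  else []
  termination_by l.length - s

-- B's scan result: both markers merged, in increasing position order
def bothFrom (l : List Char) (s : Nat) : List (Bool × Int) :=
  if _h : s < l.length then
    (if patD <+: l.drop s then [(true, (s : Int))]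
     else if patN <+: l.drop s then [(false, (s : Int))]
     else []) ++ bothFrom l (s + 1)
  else []
  termination_by l.length - s

lemma occsFrom_of_le (p l : List Char) (s : Nat) (h : l.length ≤ s) :
    occsFrom p l s = [] := by
  unfold occsFrom; rw [dif_neg (by omega)]

lemma occsFrom_skip (p l : List Char) (s : Nat) (h : ¬ p <+: l.drop s) :
    occsFrom p l s = occsFrom p l (s + 1) := by
  by_cases hs : s < l.length
  · conv_lhs => rw [occsFrom]
    rw [dif_pos hs, if_neg h, List.nil_append]
  · rw [occsFrom_of_le p l s (by omega), occsFrom_of_le p l (s + 1) (by omega)]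

lemma occsFrom_cons (p l : List Char) (s : Nat) (hs : s < l.length) (h : p <+: l.drop s) :
    occsFrom p l s = s :: occsFrom p l (s + 1) := by
  conv_lhs => rw [occsFrom]
  rw [dif_pos hs, if_pos h]
  rfl

lemma pos_lt_of_prefix (p l : List Char) (j : Nat) (hp : p ≠ []) (h : p <+: l.drop j) :
    j + p.length ≤ l.length := by
  have := h.length_le
  have hd : (l.drop j).length = l.length - j := List.length_drop ..
  have : 1 ≤ p.length := List.length_pos_iff.mpr hp
  omega

lemma occsFrom_eq_nil (p l : List Char) (s : Nat)
    (h : ∀ j, s ≤ j → ¬ p <+: l.drop j) : occsFrom p l s = [] := by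
  have key : ∀ d s, l.length - s ≤ d → (∀ j, s ≤ j → ¬ p <+: l.drop j) →
      occsFrom p l s = [] := by
    intro d
    induction d with
    | zero => intro s hd _; exact occsFrom_of_le p l s (by omega)
    | succ d ih =>
      intro s hd hall
      by_cases hs : s < l.length
      · rw [occsFrom_skip p l s (hall s le_rfl)]
        exact ih (s + 1) (by omega) (fun j hj => hall j (by omega))
      · exact occsFrom_of_le p l s (by omega)
  exact key _ s le_rfl h

-- decomposition of occsFrom at the first occurrence m, when the pattern cannot
-- re-occur at m+1 or m+2 (true for both markers)
lemma occsFrom_first (p l : List Char) (m : Nat)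
    (hov : ∀ j, p <+: l.drop j → ¬ p <+: l.drop (j + 1) ∧ ¬ p <+: l.drop (j + 2))
    (hm : p <+: l.drop m) (hmlt : m < l.length) :
    ∀ d s, m - s = d → s ≤ m → (∀ i, s ≤ i → i < m → ¬ p <+: l.drop i) →
      occsFrom p l s = m :: occsFrom p l (m + 3) := by
  intro d
  induction d with
  | zero =>
    intro s hd hsm _
    have hsm' : s = m := by omega
    subst hsm'
    rw [occsFrom_cons p l s hmlt hm]
    congr 1
    have e1 : s + 1 + 1 = s + 2 := rfl
    have e2 : s + 2 + 1 = s + 3 := rfl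
    rw [occsFrom_skip p l (s + 1) (hov s hm).1, e1,
        occsFrom_skip p l (s + 2) (hov s hm).2, e2]
  | succ d ih =>
    intro s hd hsm hmin
    have hslt : s < m := by omega
    rw [occsFrom_skip p l s (hmin s le_rfl hslt)]
    exact ih (s + 1) (by omega) (by omega) (fun i hi => hmin i (by omega))

-- A's while-loop collects exactly the occurrences ≥ start, in increasing order
lemma findLoopA_eq (memory sub : String) (flag : Bool)
    (hlen : 3 ≤ sub.toList.length)
    (hov : ∀ j, sub.toList <+: memory.toList.drop j →
      ¬ sub.toList <+: memory.toList.drop (j + 1) ∧ ¬ sub.toList <+: memory.toList.drop (j + 2)) :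
    ∀ fuel s (acc : List (Bool × Int)), s ≤ memory.toList.length →
      memory.toList.length + 1 - s ≤ fuel →
      findLoopA memory sub flag acc (s : Int) fuel
        = acc ++ (occsFrom sub.toList memory.toList s).map (fun k => (flag, (k : Int))) := by
  intro fuel
  induction fuel with
  | zero => intro s acc hs hf; omega
  | succ fuel ih =>
    intro s acc hs hf
    by_cases hneg : PySem.Chars.findFrom memory.toList sub.toList (s : Int) = -1
    · have hnone_eq : next_instruction memory sub (s : Int) = none := by
        unfold next_instruction
        rw [PySem.Str.findFrom_eq, if_pos hneg]
      unfold findLoopA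
      simp only [hnone_eq]
      have hno : ¬ sub.toList <:+: memory.toList.drop s :=
        (PySem.Chars.findFrom_natCast_eq_neg_one_iff memory.toList sub.toList s hs).mp hneg
      have hnone : ∀ j, s ≤ j → ¬ sub.toList <+: memory.toList.drop j := by
        intro j hj hpre
        apply hno
        have hdd : memory.toList.drop j = (memory.toList.drop s).drop (j - s) := by
          rw [List.drop_drop]; congr 1; omega
        rw [hdd] at hpre
        exact hpre.isInfix.trans (List.drop_suffix (j - s) (memory.toList.drop s)).isInfix
      rw [occsFrom_eq_nil sub.toList memory.toList s hnone]
      simp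
    · have hspec := PySem.Chars.findFrom_natCast_spec memory.toList sub.toList s hs hneg
      set r := PySem.Chars.findFrom memory.toList sub.toList (s : Int) with hr
      obtain ⟨hge, hpre, hmin⟩ := hspec
      have hr0 : 0 ≤ r := le_trans (by exact_mod_cast Int.natCast_nonneg s) hge
      set m := r.toNat with hmdef
      have hrm : r = (m : Int) := (Int.toNat_of_nonneg hr0).symm
      have hsm : s ≤ m := by omega
      have hmlen : m + sub.toList.length ≤ memory.toList.length :=
        pos_lt_of_prefix sub.toList memory.toList m (by intro h; rw [h] at hlen; simp at hlen) hpre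
      have hsome : next_instruction memory sub (s : Int) = some ((m : Nat) : Int) := by
        unfold next_instruction
        rw [PySem.Str.findFrom_eq, if_neg hneg]
        exact congrArg some hrm
      unfold findLoopA
      simp only [hsome]
      have hcast : ((m : Nat) : Int) + 3 = ((m + 3 : Nat) : Int) := by push_cast; ring
      rw [hcast]
      rw [ih (m + 3) (acc ++ [(flag, ((m : Nat) : Int))]) (by omega) (by omega)]
      rw [occsFrom_first sub.toList memory.toList m hov hpre (by omega) (m - s) s rfl hsm
            (fun i hi him => hmin i hi him)]
      simp

-- concrete pattern facts ---------------------------------------------------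

lemma patD_no_ov (l : List Char) (j : Nat) (h : patD <+: l.drop j) :
    ¬ patD <+: l.drop (j + 1) ∧ ¬ patD <+: l.drop (j + 2) := by
  obtain ⟨t, ht⟩ := h
  have h1 : l.drop (j + 1) = 'o' :: '(' :: ')' :: t := by
    rw [← List.drop_drop (i := 1) (j := j), ← ht]; rfl
  have h2 : l.drop (j + 2) = '(' :: ')' :: t := by
    rw [← List.drop_drop (i := 2) (j := j), ← ht]; rfl
  constructor
  · intro hp; obtain ⟨u, hu⟩ := hp; rw [h1] at hu; simp [patD] at hu
  · intro hp; obtain ⟨u, hu⟩ := hp; rw [h2] at hu; simp [patD] at hu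

lemma patN_no_ov (l : List Char) (j : Nat) (h : patN <+: l.drop j) :
    ¬ patN <+: l.drop (j + 1) ∧ ¬ patN <+: l.drop (j + 2) := by
  obtain ⟨t, ht⟩ := h
  have h1 : l.drop (j + 1) = 'o' :: 'n' :: '\'' :: 't' :: '(' :: ')' :: t := by
    rw [← List.drop_drop (i := 1) (j := j), ← ht]; rfl
  have h2 : l.drop (j + 2) = 'n' :: '\'' :: 't' :: '(' :: ')' :: t := by
    rw [← List.drop_drop (i := 2) (j := j), ← ht]; rfl
  constructor
  · intro hp; obtain ⟨u, hu⟩ := hp; rw [h1] at hu; simp [patN] at hu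
  · intro hp; obtain ⟨u, hu⟩ := hp; rw [h2] at hu; simp [patN] at hu

lemma patD_patN_disjoint (t : List Char) (hD : patD <+: t) : ¬ patN <+: t := by
  obtain ⟨u, hu⟩ := hD
  intro hN
  obtain ⟨v, hv⟩ := hN
  rw [← hu] at hv
  simp [patD, patN] at hv

-- bothFrom vs the two occurrence lists -------------------------------------

lemma bothFrom_of_le (l : List Char) (s : Nat) (h : l.length ≤ s) : bothFrom l s = [] := by
  unfold bothFrom; rw [dif_neg (by omega)]

lemma bothFrom_perm (l : List Char) :
    ∀ d s, l.length - s ≤ d →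
      (bothFrom l s).Perm
        ((occsFrom patD l s).map (fun k => (true, (k : Int)))
          ++ (occsFrom patN l s).map (fun k => (false, (k : Int)))) := by
  intro d
  induction d with
  | zero =>
    intro s hd
    rw [bothFrom_of_le l s (by omega), occsFrom_of_le patD l s (by omega),
        occsFrom_of_le patN l s (by omega)]
    simp
  | succ d ih =>
    intro s hd
    by_cases hs : s < l.length
    · have ihs := ih (s + 1) (by omega)
      unfold bothFrom
      rw [dif_pos hs]
      by_cases hD : patD <+: l.drop s
      · have hN : ¬ patN <+: l.drop s := patD_patN_disjoint _ hD
        rw [if_pos hD, occsFrom_cons patD l s hs hD, occsFrom_skip patN l s hN]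
        simpa using ihs.cons (true, (s : Int))
      · rw [if_neg hD, occsFrom_skip patD l s hD]
        by_cases hN : patN <+: l.drop s
        · rw [if_pos hN, occsFrom_cons patN l s hs hN]
          simp only [List.singleton_append]
          exact (ihs.cons (false, (s : Int))).trans List.perm_middle.symm
        · rw [if_neg hN, occsFrom_skip patN l s hN]
          simpa using ihs
    · rw [bothFrom_of_le l s (by omega), occsFrom_of_le patD l s (by omega),
          occsFrom_of_le patN l s (by omega)]
      simp

lemma bothFrom_mem_le (l : List Char) :
    ∀ d s p, l.length - s ≤ d → p ∈ bothFrom l s → (s : Int) ≤ p.2 := by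
  intro d
  induction d with
  | zero => intro s p hd hp; rw [bothFrom_of_le l s (by omega)] at hp; simp at hp
  | succ d ih =>
    intro s p hd hp
    by_cases hs : s < l.length
    · unfold bothFrom at hp
      rw [dif_pos hs] at hp
      rcases List.mem_append.mp hp with h | h
      · split_ifs at h <;> simp_all
      · have := ih (s + 1) p (by omega) h
        omega
    · rw [bothFrom_of_le l s (by omega)] at hp; simp at hp

lemma bothFrom_pairwise (l : List Char) :
    ∀ d s, l.length - s ≤ d →
      (bothFrom l s).Pairwise (fun a b => a.2 < b.2) := by
  intro d
  induction d with
  | zero => intro s hd; rw [bothFrom_of_le l s (by omega)]; simp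
  | succ d ih =>
    intro s hd
    by_cases hs : s < l.length
    · have ihp := ih (s + 1) (by omega)
      have hmem : ∀ p ∈ bothFrom l (s + 1), ((s : Int)) < p.2 := by
        intro p hp
        have := bothFrom_mem_le l (l.length - (s + 1)) (s + 1) p le_rfl hp
        omega
      unfold bothFrom
      rw [dif_pos hs]
      split_ifs <;> simp_all
    · rw [bothFrom_of_le l s (by omega)]; simp

-- B's foldl as a flatMap ---------------------------------------------------

lemma foldl_two_if {α : Type} (c1 c2 : α → Prop) [DecidablePred c1] [DecidablePred c2]
    (g1 g2 : α → Bool × Int) :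
    ∀ (xs : List α) (acc : List (Bool × Int)),
      xs.foldl (fun acc i => if c1 i then acc ++ [g1 i] else if c2 i then acc ++ [g2 i] else acc) acc
        = acc ++ xs.flatMap (fun i => if c1 i then [g1 i] else if c2 i then [g2 i] else []) := by
  intro xs
  induction xs with
  | nil => intro acc; simp
  | cons x xs ih =>
    intro acc
    simp only [List.foldl_cons, List.flatMap_cons]
    split_ifs <;> simp [ih]

lemma slice_take (l : List Char) (s n : Nat) :
    PySem.List.slice l (some (s : Int)) (some ((s : Int) + (n : Int))) = (l.drop s).take n :=
  PySem.List.slice_natCast_add l s n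

lemma take_eq_iff_prefix (p t : List Char) (n : Nat) (hn : p.length = n) :
    (t.take n = p) ↔ p <+: t := by
  rw [List.prefix_iff_eq_take, hn, eq_comm]

lemma flatMap_range'_eq_bothFrom (l : List Char) :
    ∀ c s, s + c = l.length →
      (List.range' s c).flatMap
        (fun k => if PySem.List.slice l (some ((k : Nat) : Int)) (some (((k : Nat) : Int) + 4)) = patD
          then [(true, ((k : Nat) : Int))]
          else if PySem.List.slice l (some ((k : Nat) : Int)) (some (((k : Nat) : Int) + 7)) = patN
          then [(false, ((k : Nat) : Int))] else [])
        = bothFrom l s := by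
  intro c
  induction c with
  | zero =>
    intro s hcs
    rw [bothFrom_of_le l s (by omega)]
    simp
  | succ c ih =>
    intro s hcs
    rw [List.range'_succ, List.flatMap_cons, ih (s + 1) (by omega)]
    have hsl : s < l.length := by omega
    conv_rhs => rw [bothFrom]
    rw [dif_pos hsl]
    congr 1
    have h4 : ((s : Int) + 4) = ((s : Int) + ((4 : Nat) : Int)) := by norm_num
    have h7 : ((s : Int) + 7) = ((s : Int) + ((7 : Nat) : Int)) := by norm_num
    rw [h4, h7, slice_take l s 4, slice_take l s 7]
    by_cases hD : patD <+: l.drop s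
    · rw [if_pos ((take_eq_iff_prefix patD (l.drop s) 4 rfl).mpr hD), if_pos hD]
    · rw [if_neg (fun h => hD ((take_eq_iff_prefix patD (l.drop s) 4 rfl).mp h)), if_neg hD]
      by_cases hN : patN <+: l.drop s
      · rw [if_pos ((take_eq_iff_prefix patN (l.drop s) 7 rfl).mpr hN), if_pos hN]
      · rw [if_neg (fun h => hN ((take_eq_iff_prefix patN (l.drop s) 7 rfl).mp h)), if_neg hN]

lemma alt_eq_bothFrom (memory : String) :
    find_instructions_alt memory = bothFrom memory.toList 0 := by
  unfold find_instructions_alt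
  have hD : "do()".toList = patD := by rfl
  have hN : "don't()".toList = patN := by rfl
  rw [hD, hN, PySem.Str.len_eq, PySem.List.pyRange_one]
  rw [foldl_two_if
        (fun i => PySem.List.slice memory.toList (some i) (some (i + 4)) = patD)
        (fun i => PySem.List.slice memory.toList (some i) (some (i + 7)) = patN)
        (fun i => (true, i)) (fun i => (false, i))]
  rw [List.flatMap_map]
  have hcast : ((memory.toList.length : Int) - 0).toNat = memory.toList.length := by omega
  rw [hcast, List.range_eq_range']
  have := flatMap_range'_eq_bothFrom memory.toList memory.toList.length 0 (by omega)
  simp only [zero_add] at this ⊢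
  rw [← this]
  rfl

-- ===== VERDICT (by name: the statement is the Claim_ definition above) =====
theorem find_instructions_spec : Claim_equal_find_instructions := by
  intro memory _
  unfold Spec_find_instructions
  have hD : "do()".toList = patD := rfl
  have hN : "don't()".toList = patN := rfl
  have hA1 := findLoopA_eq memory "do()" true (by rw [hD]; simp [patD])
    (by rw [hD]; exact patD_no_ov memory.toList)
    (memory.toList.length + 1) 0 [] (by omega) (by omega)
  simp only [Nat.cast_zero, List.nil_append, hD] at hA1
  have hA2 := findLoopA_eq memory "don't()" false (by rw [hN]; simp [patN])
    (by rw [hN]; exact patN_no_ov memory.toList)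
    (memory.toList.length + 1) 0
    ((occsFrom patD memory.toList 0).map (fun k => (true, (k : Int)))) (by omega) (by omega)
  simp only [Nat.cast_zero, hN] at hA2
  have e0 : find_instructions memory
      = PySem.List.sorted
          (findLoopA memory "don't()" false
            (findLoopA memory "do()" true [] 0 (memory.toList.length + 1))
            0 (memory.toList.length + 1)) (fun p => p.2) := rfl
  rw [e0, hA1, hA2, alt_eq_bothFrom]
  exact PySem.List.sorted_eq_of_perm_of_pairwise_lt _ _ (fun p => p.2)
    (bothFrom_perm memory.toList memory.toList.length 0 (by omega))
    (bothFrom_pairwise memory.toList memory.toList.length 0 (by omega))
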